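-- pv_equiv track=rewrite | github.com/lilhuge/cs50 | pset6/readability/readability.py | count
-- ===== SOURCE A (Python) =====
-- def count(n):
--
--     words = 1
--     ltrs = 0
--     sents = 0
--
--     for i in n:
--
--         if i.isalpha() == True:
--
--             ltrs += 1
--
--         if i == " ":
--
--             words += 1
--
--         if i in ["!","?","."]:
--
--             sents += 1
--
--     return words, ltrs, sents
-- ===== SOURCE B (Python) =====
-- def count(n):
--     freq = {}
--     for c in n:
--         freq[c] = freq.get(c, 0) + 1
--     words = freq.get(" ", 0) + 1
--     ltrs = sum(v for c, v in freq.items() if c.isalpha())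
--     sents = freq.get("!", 0) + freq.get("?", 0) + freq.get(".", 0)
--     return words, ltrs, sents
-- ===== Notes on version B (the rewrite author's own statement) =====
-- stated objective: alternative
-- what changed: Instead of maintaining three running counters while scanning, B builds a per-character frequency histogram (dict) and then derives the word, letter and sentence counts from the histogram: direct lookups for the space and the three sentence-ending punctuation marks, and a sum over the distinct alphabetic keys.
import Mathlib
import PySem

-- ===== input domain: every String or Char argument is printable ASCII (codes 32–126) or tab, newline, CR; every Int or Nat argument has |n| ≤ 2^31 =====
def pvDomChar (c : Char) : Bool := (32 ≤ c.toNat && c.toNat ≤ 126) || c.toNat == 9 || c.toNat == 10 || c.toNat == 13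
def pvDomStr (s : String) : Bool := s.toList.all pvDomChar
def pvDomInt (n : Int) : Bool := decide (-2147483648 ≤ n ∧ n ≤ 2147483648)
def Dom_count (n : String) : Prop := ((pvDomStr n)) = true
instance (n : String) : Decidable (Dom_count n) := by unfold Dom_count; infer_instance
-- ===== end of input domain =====

-- B replaces A's three running counters with a per-character frequency histogram built first, from which the three counts are then derived.
-- ===== PORT A =====
def count (n : String) : Int × Int × Int :=
  n.toList.foldl
    (fun (st : Int × Int × Int) i =>
      let words := st.1
      let ltrs := st.2.1
      let sents := st.2.2
      let ltrs := if PySem.Chars.isalpha i == true then ltrs + 1 else ltrs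
      let words := if i == ' ' then words + 1 else words
      let sents := if ['!', '?', '.'].contains i then sents + 1 else sents
      (words, ltrs, sents))
    (1, 0, 0)

-- ===== PORT B =====
def count_alt (n : String) : Int × Int × Int :=
  let freq := n.toList.foldl (fun (d : PySem.Dict Char Int) c => d.insert c (d.getD c 0 + 1)) PySem.Dict.empty
  let words := freq.getD ' ' 0 + 1
  let ltrs := ((freq.items.filter (fun p => PySem.Chars.isalpha p.1)).map (·.2)).sum
  let sents := freq.getD '!' 0 + freq.getD '?' 0 + freq.getD '.' 0
  (words, ltrs, sents)

-- ===== PRECONDITION & SPEC =====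
def Spec_count (n : String) (out : Int × Int × Int) : Prop := out = count_alt n
instance (n : String) (out : Int × Int × Int) : Decidable (Spec_count n out) := by unfold Spec_count; infer_instance

-- ===== CLAIM (what is proved, stated in full; the proofs are below) =====
def Claim_equal_count : Prop := ∀ (n : String), Dom_count n → Spec_count n (count n)

-- ===== LEMMAS AND PROOFS =====

-- A's single loop computes the three counts directly.
theorem count_loop (cs : List Char) (w l s : Int) :
    cs.foldl
      (fun (st : Int × Int × Int) i =>
        let words := st.1
        let ltrs := st.2.1
        let sents := st.2.2
        let ltrs := if PySem.Chars.isalpha i == true then ltrs + 1 else ltrs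
        let words := if i == ' ' then words + 1 else words
        let sents := if ['!', '?', '.'].contains i then sents + 1 else sents
        (words, ltrs, sents))
      (w, l, s)
    = (w + (cs.count ' ' : Int),
       l + (cs.countP (fun c => PySem.Chars.isalpha c) : Int),
       s + ((cs.count '!' : Int) + (cs.count '?' : Int) + (cs.count '.' : Int))) := by
  induction cs generalizing w l s with
  | nil => simp
  | cons c cs ih =>
    simp only [List.foldl_cons, ih, List.count_cons, List.countP_cons]
    by_cases h1 : PySem.Chars.isalpha c = true <;>
    by_cases h2 : c = ' ' <;>
    by_cases h3 : c = '!' <;>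
    by_cases h4 : c = '?' <;>
    by_cases h5 : c = '.' <;>
      simp [h1, h2, h3, h4, h5, Prod.ext_iff] <;>
      first | omega | (constructor <;> first | omega | decide)

-- indicator sum over a nodup list
theorem sum_indicator (l : List Char) (c : Char) (hnd : l.Nodup) :
    (l.map (fun k => if k = c then (1 : Int) else 0)).sum = if c ∈ l then 1 else 0 := by
  induction l with
  | nil => simp
  | cons a l ih =>
    simp only [List.nodup_cons] at hnd
    by_cases h : a = c
    · subst h
      simp [hnd.1, ih hnd.2]
    · simp [h, ih hnd.2, Ne.symm h]

-- summing counts of the distinct keys satisfying p recovers countP p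
theorem sum_counts (cs ks : List Char) (p : Char → Bool) (hnd : ks.Nodup)
    (hcov : ∀ c ∈ cs, p c = true → c ∈ ks) :
    ((ks.filter p).map (fun k => (cs.count k : Int))).sum = (cs.countP p : Int) := by
  induction cs with
  | nil => simp [List.count_nil]
  | cons c cs ih =>
    have hcov' : ∀ x ∈ cs, p x = true → x ∈ ks := fun x hx => hcov x (List.mem_cons_of_mem _ hx)
    have step : ((ks.filter p).map (fun k => ((c :: cs).count k : Int))).sum
        = ((ks.filter p).map (fun k => (cs.count k : Int))).sum
          + ((ks.filter p).map (fun k => if k = c then (1 : Int) else 0)).sum := by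
      rw [← List.sum_map_add]
      apply congrArg List.sum
      apply List.map_congr_left
      intro k _
      by_cases h : k = c <;> simp [h, eq_comm (a := c) (b := k)]
    rw [step, ih hcov', sum_indicator _ _ (hnd.filter p), List.countP_cons]
    by_cases hp : p c = true
    · have : c ∈ ks.filter p := List.mem_filter.mpr ⟨hcov c List.mem_cons_self hp, hp⟩
      simp [hp, this]
    · have : c ∉ ks.filter p := fun h => hp (List.mem_filter.mp h).2
      rw [if_neg this, if_neg hp]; simp

-- ===== VERDICT (by name: the statement is the Claim_ definition above) =====
theorem count_spec : Claim_equal_count := by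
  intro n _
  unfold Spec_count count count_alt
  rw [count_loop, PySem.Dict.foldl_insert_getD_add_one_eq_counter]
  have hg : ∀ c : Char, (PySem.Dict.counter n.toList).getD c 0 = (n.toList.count c : Int) :=
    fun c => PySem.Dict.getD_counter ..
  have hitems := PySem.Dict.items_counter (xs := n.toList)
  have hltrs :
      (((PySem.Dict.counter n.toList).items.filter (fun p => PySem.Chars.isalpha p.1)).map (·.2)).sum
        = (n.toList.countP (fun c => PySem.Chars.isalpha c) : Int) := by
    rw [hitems, List.filter_map, List.map_map]
    have : ((PySem.Set.ofList n.toList).filter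
        ((fun p => PySem.Chars.isalpha p.1) ∘ fun k => (k, (n.toList.count k : Int)))).map
        ((·.2) ∘ fun k => (k, (n.toList.count k : Int)))
        = ((PySem.Set.ofList n.toList).filter (fun c => PySem.Chars.isalpha c)).map
            (fun k => (n.toList.count k : Int)) := by
      rfl
    rw [this]
    exact sum_counts _ _ _ (PySem.Set.nodup_ofList _)
      (fun c hc _ => (PySem.Set.mem_ofList _ _).mpr hc)
  simp only [hltrs, hg, Prod.ext_iff]
  refine ⟨by ring, by ring, by ring⟩
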